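-- pv_equiv track=rewrite | github.com/MarcoGalici/TechnoEconomic_Analysis_P2P_Market_Models_on_DLT | Python Code/central_market_v2.py | _findintrsc2
-- ===== SOURCE A (Python) =====
-- def _findintrsc2(supply, demand, supply_c, demand_c):
--     """Trova intersezione delle curve di domanda e supply"""
--     market_q = 0
--     market_p = 0
--     idxD = 0
--     idxS = 0
--
--     while min(sum(supply), sum(demand)) > 0:
--         if demand_c[idxD] >= supply_c[idxS]:
--             if demand[idxD] >= supply[idxS]:
--                 diff = demand[idxD] - supply[idxS]
--                 market_q += supply[idxS]
--                 market_p = min(supply_c[idxS], demand_c[idxD])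
--                 supply[idxS] = 0
--                 demand[idxD] = diff
--                 idxS += 1
--             else:
--                 diff = supply[idxS] - demand[idxD]
--                 market_q += demand[idxD]
--                 market_p = min(supply_c[idxS], demand_c[idxD])
--                 demand[idxD] = 0
--                 supply[idxS] = diff
--                 idxD += 1
--         else:
--             break
--
--     return market_q, market_p
-- ===== SOURCE B (Python) =====
-- def _findintrsc2(supply, demand, supply_c, demand_c):
--     """Staged approach: first build the cumulative supply and demand curves
--     (prefix sums), then merge the two step curves by absolute cumulative
--     level: the traded quantity jumps straight to the next breakpoint
--     (cum_s[i] or cum_d[j]), so no residual quantities are maintained and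
--     nothing is re-summed.  Return value only: does not mutate supply/demand."""
--     cum_s = []
--     t = 0
--     for x in supply:
--         t += x
--         cum_s.append(t)
--     cum_d = []
--     t = 0
--     for x in demand:
--         t += x
--         cum_d.append(t)
--     tot_s = cum_s[-1] if cum_s else 0
--     tot_d = cum_d[-1] if cum_d else 0
--     q = 0
--     p = 0
--     i = 0
--     j = 0
--     while q < tot_s and q < tot_d and demand_c[j] >= supply_c[i]:
--         p = min(supply_c[i], demand_c[j])
--         if cum_d[j] >= cum_s[i]:
--             q = cum_s[i]
--             i += 1
--         else:
--             q = cum_d[j]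
--             j += 1
--     return q, p
-- ===== Notes on version B (the rewrite author's own statement) =====
-- stated objective: alternative
-- what changed: Replaces A's destructive sweep over residual quantities (re-summing both mutated lists every iteration) with two staged prefix-sum passes followed by a merge of the two cumulative step curves by absolute level: the traded quantity jumps directly to the next prefix-sum breakpoint, so no residuals are maintained and nothing is re-summed or mutated.
-- outside the precondition, e.g. on _findintrsc2([1, 1], [1], [0], [5]): A returns (1, 0), B returns (1, 0)
import Mathlib
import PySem

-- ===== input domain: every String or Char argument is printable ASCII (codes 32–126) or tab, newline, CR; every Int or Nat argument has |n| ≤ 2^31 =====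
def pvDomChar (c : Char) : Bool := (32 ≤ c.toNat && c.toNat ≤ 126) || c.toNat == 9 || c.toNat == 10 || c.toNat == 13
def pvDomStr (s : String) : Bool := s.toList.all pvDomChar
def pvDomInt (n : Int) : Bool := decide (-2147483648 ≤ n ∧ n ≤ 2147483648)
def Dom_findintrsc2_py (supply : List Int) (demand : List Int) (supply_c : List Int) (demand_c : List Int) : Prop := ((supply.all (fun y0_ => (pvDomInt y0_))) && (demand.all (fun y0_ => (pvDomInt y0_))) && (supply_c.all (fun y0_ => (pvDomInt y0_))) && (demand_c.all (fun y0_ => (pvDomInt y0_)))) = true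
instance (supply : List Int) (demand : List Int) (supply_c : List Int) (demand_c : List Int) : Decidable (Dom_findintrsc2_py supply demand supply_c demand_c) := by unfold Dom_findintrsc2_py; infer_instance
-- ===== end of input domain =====

-- ===== PORT A =====
-- B builds the two cumulative curves once and merges them by absolute level; A sweeps
-- residual quantities and re-sums both mutated lists each iteration.
-- A mutates supply/demand in place; the equivalence proved here is about the RETURN value only.
-- Loop of A: each iteration increments idxS or idxD, so supply.length + demand.length + 1
-- steps of fuel are never exhausted (the fuel is a totality guard only).
def findintrsc2Loop (supply_c demand_c : List Int) :
    Nat → List Int → List Int → Nat → Nat → Int → Int → Int × Int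
  | 0, _, _, _, _, market_q, market_p => (market_q, market_p)
  | fuel+1, supply, demand, idxS, idxD, market_q, market_p =>
    if min supply.sum demand.sum > 0 then
      match demand_c[idxD]?, supply_c[idxS]? with
      | some dc, some sc =>
        if dc ≥ sc then
          match demand[idxD]?, supply[idxS]? with
          | some d, some s =>
            if d ≥ s then
              findintrsc2Loop supply_c demand_c fuel (supply.set idxS 0)
                (demand.set idxD (d - s)) (idxS+1) idxD (market_q + s) (min sc dc)
            else
              findintrsc2Loop supply_c demand_c fuel (supply.set idxS (s - d))
                (demand.set idxD 0) idxS (idxD+1) (market_q + d) (min sc dc)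
          | _, _ => (market_q, market_p)   -- Python IndexError; unreachable under Pre_
        else (market_q, market_p)
      | _, _ => (market_q, market_p)       -- Python IndexError; unreachable under Pre_
    else (market_q, market_p)

def findintrsc2_py (supply : List Int) (demand : List Int) (supply_c : List Int) (demand_c : List Int) : Int × Int :=
  findintrsc2Loop supply_c demand_c (supply.length + demand.length + 1) supply demand 0 0 0 0

-- ===== PORT B =====
-- the staged prefix-sum pass of Source B (running accumulator t)
def prefixSums : List Int → Int → List Int
  | [], _ => []
  | x :: xs, t => (t + x) :: prefixSums xs (t + x)

-- merge of the two cumulative step curves: q jumps to a breakpoint cum_s[i] / cum_d[j]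
def findintrsc2AltLoop (cum_s cum_d supply_c demand_c : List Int) (tot_s tot_d : Int) :
    Nat → Nat → Nat → Int → Int → Int × Int
  | 0, _, _, q, p => (q, p)
  | fuel+1, i, j, q, p =>
    if q < tot_s ∧ q < tot_d then
      match demand_c[j]?, supply_c[i]? with
      | some dc, some sc =>
        if dc ≥ sc then
          match cum_d[j]?, cum_s[i]? with
          | some cd, some cs =>
            if cd ≥ cs then
              findintrsc2AltLoop cum_s cum_d supply_c demand_c tot_s tot_d fuel (i+1) j cs (min sc dc)
            else
              findintrsc2AltLoop cum_s cum_d supply_c demand_c tot_s tot_d fuel i (j+1) cd (min sc dc)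
          | _, _ => (q, p)                 -- Python IndexError; unreachable under Pre_
        else (q, p)
      | _, _ => (q, p)                     -- Python IndexError; unreachable under Pre_
    else (q, p)

def findintrsc2_py_alt (supply : List Int) (demand : List Int) (supply_c : List Int) (demand_c : List Int) : Int × Int :=
  let cum_s := prefixSums supply 0
  let cum_d := prefixSums demand 0
  let tot_s := cum_s.getLastD 0
  let tot_d := cum_d.getLastD 0
  findintrsc2AltLoop cum_s cum_d supply_c demand_c tot_s tot_d (supply.length + demand.length + 1) 0 0 0 0

-- ===== PRECONDITION & SPEC =====
-- A raises IndexError when a cost list is exhausted before the quantities are; Pre_ admits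
-- any input whose cost lists are at least as long as the quantity lists, plus the inputs on
-- which A returns before ever indexing past a short cost list (nonpositive total supply or
-- demand, or an immediate break because demand_c[0] < supply_c[0]).  Pre_ is narrower than
-- "A returns": with short cost lists A may still happen to return when the sums run out
-- before the short list is over-indexed; characterizing that exactly would re-run the loop.
def Pre_findintrsc2_py (supply : List Int) (demand : List Int) (supply_c : List Int) (demand_c : List Int) : Prop :=
  (supply.length ≤ supply_c.length ∧ demand.length ≤ demand_c.length)
  ∨ min supply.sum demand.sum ≤ 0
  ∨ (demand_c ≠ [] ∧ supply_c ≠ [] ∧ demand_c.headD 0 < supply_c.headD 0)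

instance (supply : List Int) (demand : List Int) (supply_c : List Int) (demand_c : List Int) : Decidable (Pre_findintrsc2_py supply demand supply_c demand_c) := by unfold Pre_findintrsc2_py; infer_instance

def pvWitness_findintrsc2_py : List Int × List Int × List Int × List Int :=
  ([3, 2], [4], [1, 5], [6])

def Spec_findintrsc2_py (supply : List Int) (demand : List Int) (supply_c : List Int) (demand_c : List Int) (out : Int × Int) : Prop := out = findintrsc2_py_alt supply demand supply_c demand_c
instance (supply : List Int) (demand : List Int) (supply_c : List Int) (demand_c : List Int) (out : Int × Int) : Decidable (Spec_findintrsc2_py supply demand supply_c demand_c out) := by unfold Spec_findintrsc2_py; infer_instance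

-- ===== CLAIM (what is proved, stated in full; the proofs are below) =====
def Claim_equal_findintrsc2_py : Prop := ∀ (supply : List Int) (demand : List Int) (supply_c : List Int) (demand_c : List Int), Dom_findintrsc2_py supply demand supply_c demand_c → Pre_findintrsc2_py supply demand supply_c demand_c → Spec_findintrsc2_py supply demand supply_c demand_c (findintrsc2_py supply demand supply_c demand_c)

-- ===== LEMMAS AND PROOFS =====

-- exit lemmas: once the relevant condition fails, either loop returns at once
lemma aLoop_exit (supply_c demand_c supply demand : List Int) (fuel idxS idxD : Nat)
    (q p : Int) (h : ¬ min supply.sum demand.sum > 0) :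
    findintrsc2Loop supply_c demand_c fuel supply demand idxS idxD q p = (q, p) := by
  cases fuel with
  | zero => rfl
  | succ n => simp [findintrsc2Loop, h]

lemma bLoop_exit (cum_s cum_d supply_c demand_c : List Int) (tot_s tot_d : Int) (fuel i j : Nat)
    (q p : Int) (h : ¬ (q < tot_s ∧ q < tot_d)) :
    findintrsc2AltLoop cum_s cum_d supply_c demand_c tot_s tot_d fuel i j q p = (q, p) := by
  cases fuel with
  | zero => rfl
  | succ n => simp only [findintrsc2AltLoop, if_neg h]

-- prefix-sum facts
lemma prefixSums_getLastD (xs : List Int) (t : Int) :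
    (prefixSums xs t).getLastD t = t + xs.sum := by
  induction xs generalizing t with
  | nil => simp [prefixSums]
  | cons x xs ih =>
    simp only [prefixSums, List.sum_cons]
    rw [List.getLastD_cons, ih]
    ring_nf

lemma prefixSums_get? (xs : List Int) (t : Int) (i : Nat) (h : i < xs.length) :
    (prefixSums xs t)[i]? = some (t + (xs.take (i+1)).sum) := by
  induction xs generalizing t i with
  | nil => simp at h
  | cons x xs ih =>
    cases i with
    | zero => simp [prefixSums]
    | succ k =>
      simp only [prefixSums, List.getElem?_cons_succ, List.take_succ_cons, List.sum_cons]
      rw [ih (t + x) k (by simpa using h)]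
      congr 1
      ring

-- shape of A's state: zeros before the cursor, the residual at the cursor,
-- the untouched original suffix after it
lemma state_sum (n : Nat) (s : Int) (t : List Int) :
    (List.replicate n (0:Int) ++ s :: t).sum = s + t.sum := by
  simp

lemma state_get (n : Nat) (s : Int) (t : List Int) :
    (List.replicate n (0:Int) ++ s :: t)[n]? = some s := by
  rw [List.getElem?_append_right (by simp)]
  simp

lemma state_set (n : Nat) (s v : Int) (t : List Int) :
    (List.replicate n (0:Int) ++ s :: t).set n v = List.replicate n (0:Int) ++ v :: t := by
  induction n with
  | zero => simp
  | succ k ih => simp [List.replicate_succ, ih]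

lemma state_shift (n : Nat) (t : List Int) :
    List.replicate n (0:Int) ++ (0:Int) :: t = List.replicate (n+1) (0:Int) ++ t := by
  induction n with
  | zero => simp [List.replicate_succ]
  | succ k ih => simpa [List.replicate_succ] using ih

lemma state_sum0 (n : Nat) (t : List Int) :
    (List.replicate n (0:Int) ++ t).sum = t.sum := by
  simp

-- the simulation: A's loop on the mutated lists (residual = breakpoint − traded q)
-- equals B's merge of the two precomputed cumulative curves
lemma loop_sim (origS origD supply_c demand_c : List Int)
    (hS : origS.length ≤ supply_c.length) (hD : origD.length ≤ demand_c.length) :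
    ∀ (fuel i j : Nat) (q p : Int), i < origS.length → j < origD.length →
    findintrsc2Loop supply_c demand_c fuel
      (List.replicate i 0 ++ ((origS.take (i+1)).sum - q) :: origS.drop (i+1))
      (List.replicate j 0 ++ ((origD.take (j+1)).sum - q) :: origD.drop (j+1)) i j q p
    = findintrsc2AltLoop (prefixSums origS 0) (prefixSums origD 0) supply_c demand_c
        origS.sum origD.sum fuel i j q p := by
  intro fuel
  induction fuel with
  | zero => intro i j q p hi hj; rfl
  | succ n ih =>
    intro i j q p hi hj
    have hjc : j < demand_c.length := lt_of_lt_of_le hj hD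
    have hic : i < supply_c.length := lt_of_lt_of_le hi hS
    have hdc : demand_c[j]? = some demand_c[j] := List.getElem?_eq_getElem hjc
    have hsc : supply_c[i]? = some supply_c[i] := List.getElem?_eq_getElem hic
    have hcs : (prefixSums origS 0)[i]? = some (0 + (origS.take (i+1)).sum) :=
      prefixSums_get? origS 0 i hi
    have hcd : (prefixSums origD 0)[j]? = some (0 + (origD.take (j+1)).sum) :=
      prefixSums_get? origD 0 j hj
    have hsplitS : (origS.take (i+1)).sum + (origS.drop (i+1)).sum = origS.sum := by
      conv_rhs => rw [← List.take_append_drop (i+1) origS]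
      simp
    have hsplitD : (origD.take (j+1)).sum + (origD.drop (j+1)).sum = origD.sum := by
      conv_rhs => rw [← List.take_append_drop (j+1) origD]
      simp
    by_cases hcond : q < origS.sum ∧ q < origD.sum
    · have hmin : min (List.replicate i (0:Int) ++ ((origS.take (i+1)).sum - q) :: origS.drop (i+1)).sum
          (List.replicate j (0:Int) ++ ((origD.take (j+1)).sum - q) :: origD.drop (j+1)).sum > 0 := by
        rw [state_sum, state_sum, gt_iff_lt, lt_min_iff]
        omega
      by_cases hdcsc : demand_c[j] ≥ supply_c[i]
      · by_cases hds : (origD.take (j+1)).sum - q ≥ (origS.take (i+1)).sum - q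
        · have hds' : (0:Int) + (origD.take (j+1)).sum ≥ 0 + (origS.take (i+1)).sum := by omega
          simp only [findintrsc2Loop, findintrsc2AltLoop, if_pos hmin, if_pos hcond,
            hdc, hsc, if_pos hdcsc, state_get, hcs, hcd, if_pos hds, if_pos hds',
            state_set, state_shift]
          have hq' : q + ((origS.take (i+1)).sum - q) = 0 + (origS.take (i+1)).sum := by ring
          have hdres : (origD.take (j+1)).sum - q - ((origS.take (i+1)).sum - q)
              = (origD.take (j+1)).sum - (0 + (origS.take (i+1)).sum) := by ring
          rw [hq', hdres]
          by_cases hi1 : i + 1 < origS.length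
          · have hdropS : origS.drop (i+1) = origS[i+1] :: origS.drop (i+2) :=
              List.drop_eq_getElem_cons hi1
            have htake : (origS.take (i+2)).sum = (origS.take (i+1)).sum + origS[i+1] :=
              List.sum_take_succ origS (i+1) hi1
            have hres : origS[i+1] = (origS.take (i+2)).sum - (0 + (origS.take (i+1)).sum) := by
              omega
            rw [hdropS, hres]
            exact ih (i+1) j (0 + (origS.take (i+1)).sum) (min supply_c[i] demand_c[j]) hi1 hj
          · have hlen : i + 1 = origS.length := by omega
            have hdropS : origS.drop (i+1) = [] := List.drop_eq_nil_of_le (by omega)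
            have htot : (origS.take (i+1)).sum = origS.sum := by
              rw [hlen, List.take_length]
            rw [bLoop_exit _ _ _ _ _ _ _ _ _ _ _ (by omega)]
            apply aLoop_exit
            rw [hdropS, state_sum0]
            simp only [gt_iff_lt, lt_min_iff, not_and_or, not_lt]
            left; simp
        · have hds' : ¬ ((0:Int) + (origD.take (j+1)).sum ≥ 0 + (origS.take (i+1)).sum) := by omega
          simp only [findintrsc2Loop, findintrsc2AltLoop, if_pos hmin, if_pos hcond,
            hdc, hsc, if_pos hdcsc, state_get, hcs, hcd, if_neg hds, if_neg hds',
            state_set, state_shift]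
          have hq' : q + ((origD.take (j+1)).sum - q) = 0 + (origD.take (j+1)).sum := by ring
          have hsres : (origS.take (i+1)).sum - q - ((origD.take (j+1)).sum - q)
              = (origS.take (i+1)).sum - (0 + (origD.take (j+1)).sum) := by ring
          rw [hq', hsres]
          by_cases hj1 : j + 1 < origD.length
          · have hdropD : origD.drop (j+1) = origD[j+1] :: origD.drop (j+2) :=
              List.drop_eq_getElem_cons hj1
            have htake : (origD.take (j+2)).sum = (origD.take (j+1)).sum + origD[j+1] :=
              List.sum_take_succ origD (j+1) hj1
            have hres : origD[j+1] = (origD.take (j+2)).sum - (0 + (origD.take (j+1)).sum) := by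
              omega
            rw [hdropD, hres]
            exact ih i (j+1) (0 + (origD.take (j+1)).sum) (min supply_c[i] demand_c[j]) hi hj1
          · have hlen : j + 1 = origD.length := by omega
            have hdropD : origD.drop (j+1) = [] := List.drop_eq_nil_of_le (by omega)
            have htot : (origD.take (j+1)).sum = origD.sum := by
              rw [hlen, List.take_length]
            rw [bLoop_exit _ _ _ _ _ _ _ _ _ _ _ (by omega)]
            apply aLoop_exit
            rw [hdropD, state_sum0]
            simp only [gt_iff_lt, lt_min_iff, not_and_or, not_lt]
            right; simp
      · -- demand_c[j] < supply_c[i] : both break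
        simp only [findintrsc2Loop, findintrsc2AltLoop, if_pos hmin, if_pos hcond,
          hdc, hsc, if_neg hdcsc]
    · -- traded q has reached a total : both exit
      rw [bLoop_exit _ _ _ _ _ _ _ _ _ _ _ hcond]
      apply aLoop_exit
      rw [state_sum, state_sum]
      rw [gt_iff_lt, lt_min_iff, not_and_or] at *
      omega

theorem findintrsc2_py_spec : Claim_equal_findintrsc2_py := by
  intro supply demand supply_c demand_c _ hPre
  unfold Spec_findintrsc2_py
  simp only [findintrsc2_py, findintrsc2_py_alt,
    prefixSums_getLastD, Int.zero_add]
  by_cases h0 : (0:Int) < supply.sum ∧ (0:Int) < demand.sum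
  · rcases hPre with ⟨hS, hD⟩ | hmin | ⟨hdne, hsne, hlt⟩
    · -- cost lists long enough: the simulation applies from the start
      have hi0 : 0 < supply.length := by
        rcases supply with _ | ⟨x, xs⟩
        · simp at h0
        · simp
      have hj0 : 0 < demand.length := by
        rcases demand with _ | ⟨x, xs⟩
        · simp at h0
        · simp
      have key := loop_sim supply demand supply_c demand_c hS hD
        (supply.length + demand.length + 1) 0 0 0 0 hi0 hj0
      have hstS : List.replicate 0 (0:Int) ++ ((supply.take 1).sum - 0) :: supply.drop 1 = supply := by
        rcases supply with _ | ⟨x, xs⟩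
        · simp at hi0
        · simp
      have hstD : List.replicate 0 (0:Int) ++ ((demand.take 1).sum - 0) :: demand.drop 1 = demand := by
        rcases demand with _ | ⟨x, xs⟩
        · simp at hj0
        · simp
      rw [hstS, hstD] at key
      exact key
    · omega
    · -- immediate break: demand_c[0] < supply_c[0]
      rcases demand_c with _ | ⟨dc0, dct⟩; · exact absurd rfl hdne
      rcases supply_c with _ | ⟨sc0, sct⟩; · exact absurd rfl hsne
      simp only [List.headD] at hlt
      have hmin : min supply.sum demand.sum > 0 := lt_min_iff.mpr h0
      simp only [findintrsc2Loop, findintrsc2AltLoop, if_pos hmin, if_pos h0,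
        List.getElem?_cons_zero, if_neg (not_le.mpr hlt)]
  · -- a total sum is nonpositive: both return (0, 0) immediately
    rw [bLoop_exit _ _ _ _ _ _ _ _ _ _ _ h0]
    apply aLoop_exit
    simpa [gt_iff_lt, lt_min_iff] using h0
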